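-- pv_equiv track=rewrite | github.com/mikedee56/Post-Processing-Shruti | src/semantic_analysis/semantic_analyzer.py | _are_terms_semantically_related
-- ===== SOURCE A (Python) =====
-- def _are_terms_semantically_related(term1: str, term2: str) -> bool:
--     """Check if terms are semantically related"""
--     # Check if terms share common roots or concepts
--     spiritual_terms = {'krishna', 'dharma', 'karma', 'yoga', 'atman', 'brahman', 'moksha'}
--     philosophical_terms = {'consciousness', 'reality', 'truth', 'knowledge', 'wisdom'}
--
--     term1_in_spiritual = any(word in term1 for word in spiritual_terms)
--     term2_in_spiritual = any(word in term2 for word in spiritual_terms)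
--     term1_in_philosophical = any(word in term1 for word in philosophical_terms)
--     term2_in_philosophical = any(word in term2 for word in philosophical_terms)
--
--     return (term1_in_spiritual and term2_in_spiritual) or (term1_in_philosophical and term2_in_philosophical)
-- ===== SOURCE B (Python) =====
-- def _are_terms_semantically_related(term1: str, term2: str) -> bool:
--     """Check if terms are semantically related"""
--     tagged = [
--         ('spiritual', 'krishna'), ('spiritual', 'dharma'), ('spiritual', 'karma'),
--         ('spiritual', 'yoga'), ('spiritual', 'atman'), ('spiritual', 'brahman'),
--         ('spiritual', 'moksha'),
--         ('philosophical', 'consciousness'), ('philosophical', 'reality'),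
--         ('philosophical', 'truth'), ('philosophical', 'knowledge'),
--         ('philosophical', 'wisdom'),
--     ]
--     # index pass: categories hit by term1
--     cats1 = {cat for cat, word in tagged if word in term1}
--     # scan pass with early exit: does any keyword of an indexed category hit term2?
--     return any(cat in cats1 for cat, word in tagged if word in term2)
-- ===== Notes on version B (the rewrite author's own statement) =====
-- stated objective: alternative
-- what changed: Replaces A's four per-term boolean flags and the hardcoded (s1 and s2) or (p1 and p2) formula with a flat category-tagged keyword list: a first pass builds the index of categories term1 matches, then a single short-circuiting scan over the tagged list checks whether any keyword matching term2 belongs to an indexed category.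
import Mathlib
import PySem

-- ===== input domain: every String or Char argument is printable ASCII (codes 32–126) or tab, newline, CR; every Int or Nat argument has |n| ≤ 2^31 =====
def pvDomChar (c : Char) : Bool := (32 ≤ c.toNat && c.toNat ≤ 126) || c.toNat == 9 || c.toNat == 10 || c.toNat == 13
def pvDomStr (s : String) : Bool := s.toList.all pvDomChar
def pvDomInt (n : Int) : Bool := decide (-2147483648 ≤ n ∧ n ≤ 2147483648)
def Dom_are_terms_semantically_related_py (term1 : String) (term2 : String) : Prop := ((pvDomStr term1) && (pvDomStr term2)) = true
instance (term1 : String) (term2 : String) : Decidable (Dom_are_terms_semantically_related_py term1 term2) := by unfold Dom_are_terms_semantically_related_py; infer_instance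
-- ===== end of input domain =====

-- B replaces A's four per-term boolean flags and hardcoded (s1∧s2)∨(p1∧p2) formula with a flat
-- category-tagged keyword list: an index of term1's categories, then one scan for term2 (objective: alternative).

-- ===== PORT A =====
def are_terms_semantically_related_py (term1 : String) (term2 : String) : Bool :=
  let spiritual_terms : List String := ["krishna", "dharma", "karma", "yoga", "atman", "brahman", "moksha"]
  let philosophical_terms : List String := ["consciousness", "reality", "truth", "knowledge", "wisdom"]
  let term1_in_spiritual := spiritual_terms.any (fun word => PySem.Str.isIn word term1)
  let term2_in_spiritual := spiritual_terms.any (fun word => PySem.Str.isIn word term2)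
  let term1_in_philosophical := philosophical_terms.any (fun word => PySem.Str.isIn word term1)
  let term2_in_philosophical := philosophical_terms.any (fun word => PySem.Str.isIn word term2)
  (term1_in_spiritual && term2_in_spiritual) || (term1_in_philosophical && term2_in_philosophical)

-- ===== PORT B =====
-- the flat category-tagged keyword list of Source B
def pvTagged : List (String × String) :=
  [("spiritual", "krishna"), ("spiritual", "dharma"), ("spiritual", "karma"),
   ("spiritual", "yoga"), ("spiritual", "atman"), ("spiritual", "brahman"),
   ("spiritual", "moksha"),
   ("philosophical", "consciousness"), ("philosophical", "reality"),
   ("philosophical", "truth"), ("philosophical", "knowledge"),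
   ("philosophical", "wisdom")]

def are_terms_semantically_related_py_alt (term1 : String) (term2 : String) : Bool :=
  -- index pass: cats1 = {cat for cat, word in tagged if word in term1}
  let cats1 : PySem.Set String :=
    PySem.Set.ofList ((pvTagged.filter (fun p => PySem.Str.isIn p.2 term1)).map Prod.fst)
  -- scan pass: any(cat in cats1 for cat, word in tagged if word in term2)
  (pvTagged.filter (fun q => PySem.Str.isIn q.2 term2)).any (fun q => PySem.Set.contains cats1 q.1)

-- ===== PRECONDITION & SPEC =====
def Spec_are_terms_semantically_related_py (term1 : String) (term2 : String) (out : Bool) : Prop := out = are_terms_semantically_related_py_alt term1 term2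
instance (term1 : String) (term2 : String) (out : Bool) : Decidable (Spec_are_terms_semantically_related_py term1 term2 out) := by unfold Spec_are_terms_semantically_related_py; infer_instance

-- ===== CLAIM (what is proved, stated in full; the proofs are below) =====
def Claim_equal_are_terms_semantically_related_py : Prop := ∀ (term1 : String) (term2 : String), Dom_are_terms_semantically_related_py term1 term2 → Spec_are_terms_semantically_related_py term1 term2 (are_terms_semantically_related_py term1 term2)

-- ===== LEMMAS AND PROOFS =====
-- (l.filter f).any g = l.any (f && g): the comprehension's filter pushed into the any
theorem pv_any_filter {α : Type} (l : List α) (f g : α → Bool) :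
    (l.filter f).any g = l.any (fun x => f x && g x) := by
  induction l with
  | nil => rfl
  | cons x xs ih =>
      by_cases h : f x = true <;>
        simp [List.any_cons, h, ih]

-- pull a factor that does not depend on the element out of an any
theorem pv_any_and {α : Type} (l : List α) (f : α → Bool) (b : Bool) :
    (l.any fun x => f x && b) = (l.any f && b) := by
  induction l with
  | nil => simp
  | cons x xs ih => simp [List.any_cons, ih, Bool.and_or_distrib_right]

-- the index contains "spiritual" iff some spiritual keyword hits term1
theorem pv_contains_spiritual (t : String) :
    PySem.Set.contains
      (PySem.Set.ofList ((pvTagged.filter (fun p => PySem.Str.isIn p.2 t)).map Prod.fst))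
      "spiritual"
    = List.any ["krishna", "dharma", "karma", "yoga", "atman", "brahman", "moksha"]
        (fun word => PySem.Str.isIn word t) := by
  rw [Bool.eq_iff_iff]
  simp [PySem.Set.contains, PySem.Set.mem_ofList, pvTagged, List.mem_filter]

-- the index contains "philosophical" iff some philosophical keyword hits term1
theorem pv_contains_philosophical (t : String) :
    PySem.Set.contains
      (PySem.Set.ofList ((pvTagged.filter (fun p => PySem.Str.isIn p.2 t)).map Prod.fst))
      "philosophical"
    = List.any ["consciousness", "reality", "truth", "knowledge", "wisdom"]
        (fun word => PySem.Str.isIn word t) := by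
  rw [Bool.eq_iff_iff]
  simp [PySem.Set.contains, PySem.Set.mem_ofList, pvTagged, List.mem_filter]

-- ===== VERDICT (by name: the statement is the Claim_ definition above) =====
set_option maxHeartbeats 1000000 in
theorem are_terms_semantically_related_py_spec : Claim_equal_are_terms_semantically_related_py := by
  intro t1 t2 _
  show are_terms_semantically_related_py t1 t2 = are_terms_semantically_related_py_alt t1 t2
  simp only [are_terms_semantically_related_py, are_terms_semantically_related_py_alt]
  rw [pv_any_filter]
  generalize hc : PySem.Set.ofList
      ((pvTagged.filter (fun p => PySem.Str.isIn p.2 t1)).map Prod.fst) = c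
  rw [show pvTagged =
        (List.map (fun w => (("spiritual" : String), w))
          ["krishna", "dharma", "karma", "yoga", "atman", "brahman", "moksha"]) ++
        (List.map (fun w => (("philosophical" : String), w))
          ["consciousness", "reality", "truth", "knowledge", "wisdom"]) from rfl,
      List.any_append, List.any_map, List.any_map]
  simp only [Function.comp_def]
  rw [pv_any_and, pv_any_and, ← hc, pv_contains_spiritual, pv_contains_philosophical]
  generalize List.any ["krishna", "dharma", "karma", "yoga", "atman", "brahman", "moksha"]
      (fun word => PySem.Str.isIn word t1) = s1
  generalize List.any ["krishna", "dharma", "karma", "yoga", "atman", "brahman", "moksha"]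
      (fun word => PySem.Str.isIn word t2) = s2
  generalize List.any ["consciousness", "reality", "truth", "knowledge", "wisdom"]
      (fun word => PySem.Str.isIn word t1) = p1
  generalize List.any ["consciousness", "reality", "truth", "knowledge", "wisdom"]
      (fun word => PySem.Str.isIn word t2) = p2
  cases s1 <;> cases s2 <;> cases p1 <;> cases p2 <;> rfl
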